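-- pv_equiv track=rewrite | github.com/andrew2004Z/STR_EASY_V2 | ft_find_second_char.py | ft_find_second_char
-- ===== SOURCE A (Python) =====
-- def ft_len(sstr):
--     l = 0
--     for i in sstr:
--         l += 1
--     return l
--
-- def ft_find_second_char(char, sstr):
--     count = 0
--     x = 0
--     r = 0
--     if char in sstr:
--         for i in range(ft_len(sstr)):
--             if sstr[i] == char:
--                 x = i
--                 break
--         for i in sstr:
--             if i == char:
--                 count+=1
--         if count == 1:
--             return -1
--         else:
--             for i in range(ft_len(sstr)):
--                 if sstr[i] == char and i!=x:
--                     r = i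
--                     break
--             return r
--     else:
--         return  -2
-- ===== SOURCE B (Python) =====
-- def ft_find_second_char(char, sstr):
--     count = 0
--     for i in range(len(sstr)):
--         if sstr[i] == char:
--             count += 1
--             if count == 2:
--                 return i
--     return -2 if count == 0 else -1
-- ===== Notes on version B (the rewrite author's own statement) =====
-- stated objective: simpler
-- what changed: One single pass with a running occurrence counter (return the index the moment the counter hits 2) replaces A's four separate scans (substring membership, find-first, count-all, find-second).
-- outside the precondition, e.g. on ft_find_second_char('ab', 'ab'): A returns 0, B returns -2; on ft_find_second_char('', 'x'): A returns 0, B returns -2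
import Mathlib
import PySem

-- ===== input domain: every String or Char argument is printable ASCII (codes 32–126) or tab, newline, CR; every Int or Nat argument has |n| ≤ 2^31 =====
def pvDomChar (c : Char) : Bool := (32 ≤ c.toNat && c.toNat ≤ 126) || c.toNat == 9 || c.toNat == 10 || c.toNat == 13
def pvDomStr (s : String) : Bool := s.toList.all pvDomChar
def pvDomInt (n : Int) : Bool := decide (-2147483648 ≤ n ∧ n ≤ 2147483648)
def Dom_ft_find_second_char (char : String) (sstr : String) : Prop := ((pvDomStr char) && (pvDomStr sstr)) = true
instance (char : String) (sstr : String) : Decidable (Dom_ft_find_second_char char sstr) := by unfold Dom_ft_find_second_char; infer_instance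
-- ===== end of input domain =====

-- B replaces A's four separate scans by one single pass with a running occurrence counter (simpler);
-- equivalence is claimed on the function's natural domain (char a single character), see Pre_ below.


-- ===== PORT A =====
-- `sstr[i] == char` compares the one-character string sstr[i] with char: exact as [ch] = char.toList.
-- The Python loops `for i in range(ft_len(sstr)): … sstr[i] …` visit the characters of sstr in index
-- order; they are transcribed as a traversal of sstr.toList carrying the index i — exact.

-- first loop: x = first index with sstr[i] == char, break; x stays 0 if no hit
def ftFindX (char : String) : List Char → Nat → Int
  | [], _ => 0
  | ch :: t, i => if [ch] == char.toList then (i : Int) else ftFindX char t (i + 1)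

-- second loop: count occurrences (for i in sstr: if i == char)
def ftCount (char : String) : List Char → Nat
  | [] => 0
  | ch :: t => (if [ch] == char.toList then 1 else 0) + ftCount char t

-- third loop: r = first index with sstr[i] == char and i != x, break; r stays 0 if no hit
def ftFindR (char : String) (x : Int) : List Char → Nat → Int
  | [], _ => 0
  | ch :: t, i => if ([ch] == char.toList) && ((i : Int) != x) then (i : Int) else ftFindR char x t (i + 1)

def ft_find_second_char (char : String) (sstr : String) : Int :=
  if char.toList <:+: sstr.toList then      -- `char in sstr`: substring membership — exact
    let x := ftFindX char sstr.toList 0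
    let count := ftCount char sstr.toList
    if count == 1 then -1
    else ftFindR char x sstr.toList 0
  else -2

-- ===== PORT B =====
-- single pass over sstr with index i and running counter cnt; returns i the moment cnt reaches 2
def goAlt (char : String) : List Char → Nat → Nat → Int
  | [], _, cnt => if cnt == 0 then -2 else -1
  | ch :: t, i, cnt =>
    if [ch] == char.toList then
      if cnt + 1 == 2 then (i : Int) else goAlt char t (i + 1) (cnt + 1)
    else goAlt char t (i + 1) cnt

def ft_find_second_char_alt (char : String) (sstr : String) : Int :=
  goAlt char sstr.toList 0 0

-- ===== PRECONDITION & SPEC =====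
-- Pre_ excludes only the corner where `char` is not a single character (empty or multi-char) yet
-- occurs as a substring of `sstr`: there Python's `char in sstr` succeeds although no position of
-- sstr can equal char, a corner outside the function's purpose on which A returns the leftover
-- initial 0 and B returns -2; both codes are artefacts of that degenerate call.
def Pre_ft_find_second_char (char : String) (sstr : String) : Prop :=
  char.toList.length = 1 ∨ ¬ (char.toList <:+: sstr.toList)
instance (char : String) (sstr : String) : Decidable (Pre_ft_find_second_char char sstr) := by
  unfold Pre_ft_find_second_char; infer_instance

def pvWitness_ft_find_second_char : String × String := ("a", "aba")

def Spec_ft_find_second_char (char : String) (sstr : String) (out : Int) : Prop :=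
  out = ft_find_second_char_alt char sstr
instance (char : String) (sstr : String) (out : Int) : Decidable (Spec_ft_find_second_char char sstr out) := by
  unfold Spec_ft_find_second_char; infer_instance

-- ===== CLAIM (what is proved, stated in full; the proofs are below) =====
def Claim_equal_ft_find_second_char : Prop := ∀ (char : String) (sstr : String), Dom_ft_find_second_char char sstr → Pre_ft_find_second_char char sstr → Spec_ft_find_second_char char sstr (ft_find_second_char char sstr)

-- ===== LEMMAS AND PROOFS =====

-- no character of l matches → count is 0
theorem ftCount_zero (char : String) (l : List Char)
    (h : ∀ ch ∈ l, ¬ ([ch] = char.toList)) : ftCount char l = 0 := by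
  induction l with
  | nil => rfl
  | cons ch t ih =>
    simp only [ftCount]
    rw [if_neg (by simpa using h ch (by simp))]
    simpa using ih (fun c hc => h c (by simp [hc]))

-- count 0 → B's pass returns -2 / -1 according to the entering counter
theorem goAlt_count_zero (char : String) (l : List Char) (i cnt : Nat)
    (h : ftCount char l = 0) :
    goAlt char l i cnt = if cnt == 0 then -2 else -1 := by
  induction l generalizing i with
  | nil => rfl
  | cons ch t ih =>
    simp only [ftCount, beq_iff_eq] at h
    by_cases hm : [ch] = char.toList
    · simp [hm] at h
    · simp only [goAlt, beq_iff_eq, if_neg hm]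
      rw [if_neg hm] at h
      simpa using ih (i + 1) (by simpa using h)

-- count 1 → B returns -1
theorem goAlt_count_one (char : String) (l : List Char) (i : Nat)
    (h : ftCount char l = 1) :
    goAlt char l i 0 = -1 := by
  induction l generalizing i with
  | nil => simp [ftCount] at h
  | cons ch t ih =>
    simp only [ftCount, beq_iff_eq] at h
    by_cases hm : [ch] = char.toList
    · rw [if_pos hm] at h
      simp only [goAlt, beq_iff_eq, if_pos hm]
      rw [goAlt_count_zero char t (i + 1) 1 (by omega)]
      rfl
    · rw [if_neg hm] at h
      simp only [goAlt, beq_iff_eq, if_neg hm]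
      exact ih (i + 1) (by omega)

-- after the first hit (at index j < i) B's pass with counter 1 finds the same index as A's
-- third loop looking for a hit ≠ j, provided another hit exists
theorem goAlt_one_eq_findR (char : String) (l : List Char) (j : Int) (i : Nat)
    (hc : 1 ≤ ftCount char l) (hj : j < (i : Int)) :
    goAlt char l i 1 = ftFindR char j l i := by
  induction l generalizing i with
  | nil => simp [ftCount] at hc
  | cons ch t ih =>
    by_cases hm : [ch] = char.toList
    · have hne : ((i : Int) != j) = true := by simp; omega
      simp [goAlt, ftFindR, hm, hne]
    · simp only [ftCount, beq_iff_eq] at hc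
      rw [if_neg hm] at hc
      have hm' : ([ch] == char.toList) = false := by simpa using hm
      simp only [goAlt, ftFindR, hm', Bool.false_and, if_neg (Bool.false_ne_true)]
      exact ih (i + 1) (by omega) (by push_cast; omega)

-- count ≥ 2 → B's single pass equals A's find-first-then-find-second composition
theorem goAlt_count_two (char : String) (l : List Char) (i : Nat)
    (h : 2 ≤ ftCount char l) :
    goAlt char l i 0 = ftFindR char (ftFindX char l i) l i := by
  induction l generalizing i with
  | nil => simp [ftCount] at h
  | cons ch t ih =>
    by_cases hm : [ch] = char.toList
    · have hc : 1 ≤ ftCount char t := by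
        simp only [ftCount, beq_iff_eq, if_pos hm] at h; omega
      have hne : ((i : Int) != (i : Int)) = false := by simp
      simp only [goAlt, ftFindX, ftFindR, beq_iff_eq, if_pos hm, hne,
        Bool.and_false, if_neg (by simp : ¬ ((false : Bool) = true))]
      simpa using goAlt_one_eq_findR char t (i : Int) (i + 1) hc (by push_cast; omega)
    · simp only [ftCount, beq_iff_eq] at h
      rw [if_neg hm] at h
      have hm' : ([ch] == char.toList) = false := by simpa using hm
      simp only [goAlt, ftFindX, ftFindR, hm', Bool.false_and, if_neg (Bool.false_ne_true)]
      exact ih (i + 1) (by omega)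

-- membership gives positive count for a single-character char
theorem ftCount_pos (c : Char) (char : String) (l : List Char)
    (hc : char.toList = [c]) (hm : c ∈ l) : 1 ≤ ftCount char l := by
  induction l with
  | nil => simp at hm
  | cons ch t ih =>
    simp only [ftCount, beq_iff_eq]
    by_cases h : [ch] = char.toList
    · rw [if_pos h]; omega
    · rw [if_neg h]
      rcases List.mem_cons.mp hm with h1 | h1
      · exact absurd (by rw [hc, h1]) h
      · simpa using ih h1

-- [c] is an infix of l iff c is a member of l
theorem singleton_infix_iff (c : Char) (l : List Char) : [c] <:+: l ↔ c ∈ l := by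
  constructor
  · intro h
    exact (List.singleton_sublist).mp h.sublist
  · intro h
    rcases List.append_of_mem h with ⟨s, t, rfl⟩
    exact ⟨s, t, by simp⟩

-- ===== VERDICT (by name: the statement is the Claim_ definition above) =====
theorem ft_find_second_char_spec : Claim_equal_ft_find_second_char := by
  intro char sstr _
  unfold Pre_ft_find_second_char Spec_ft_find_second_char
  intro hpre
  unfold ft_find_second_char ft_find_second_char_alt
  by_cases hin : char.toList <:+: sstr.toList
  · -- char occurs as a substring; with Pre_ this forces char = [c], so count ≥ 1
    have hlen : char.toList.length = 1 := by
      rcases hpre with h | h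
      · exact h
      · exact absurd hin h
    obtain ⟨c, hc⟩ : ∃ c, char.toList = [c] := by
      cases h : char.toList with
      | nil => rw [h] at hlen; simp at hlen
      | cons a t =>
        cases t with
        | nil => exact ⟨a, rfl⟩
        | cons b u => rw [h] at hlen; simp at hlen
    have hmem : c ∈ sstr.toList := by
      rw [hc] at hin; exact (singleton_infix_iff c sstr.toList).mp hin
    have hpos : 1 ≤ ftCount char sstr.toList := ftCount_pos c char sstr.toList hc hmem
    rw [if_pos hin]
    by_cases h1 : ftCount char sstr.toList = 1
    · simp only [h1]
      exact (goAlt_count_one char sstr.toList 0 h1).symm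
    · have h2 : 2 ≤ ftCount char sstr.toList := by omega
      simp only [beq_iff_eq, if_neg h1]
      exact (goAlt_count_two char sstr.toList 0 h2).symm
  · -- no occurrence at all: both return -2
    rw [if_neg hin]
    have hnone : ∀ ch ∈ sstr.toList, ¬ ([ch] = char.toList) := by
      intro ch hch heq
      exact hin (heq ▸ (singleton_infix_iff ch sstr.toList).mpr hch)
    rw [goAlt_count_zero char sstr.toList 0 0 (ftCount_zero char sstr.toList hnone)]
    rfl
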